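-- pv_equiv track=rewrite | github.com/LikeLion11th-Algorithm/Yunhee-Hwang | programmers/Lv.1/72410: 신규 아이디 추천.py | solution
-- ===== SOURCE A (Python) =====
-- def solution(new_id):
--     # 1단계
--     new_id = new_id.lower()
--
--     # 2단계
--     possible = ['-', '_', '.']
--     check = []
--
--     for i in range(len(new_id)):
--         if new_id[i] not in possible:
--             if new_id[i].isalpha() or new_id[i].isdigit():
--                 continue
--             else:
--                 check.append(new_id[i])
--
--     for j in range(len(check)):
--         new_id = new_id.replace(check[j], '')
--
--     # 3단계
--     while '..' in new_id:
--         new_id = new_id.replace('..', '.')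
--
--     # 4단계
--     if new_id[0] == '.':
--         new_id = new_id[1:]
--
--     if len(new_id) >= 1:
--         if new_id[-1] == '.':
--             new_id = new_id.rstrip('.')
--
--     # 5단계
--     if new_id == '':
--         new_id = 'a'
--
--     # 6단계
--     if len(new_id) >= 16:
--         new_id = new_id[0:15]
--         if new_id[-1] == '.':
--             new_id = new_id[0:14]
--
--     # 7단계
--     while len(new_id) <= 2:
--         new_id = new_id + new_id[-1]
--
--     return new_id
-- ===== SOURCE B (Python) =====
-- def solution(new_id):
--     # one forward pass fusing steps 1-3: keep letters/digits/-/_/., collapsing runs of dots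
--     out = []
--     for ch in new_id.lower():
--         if ch.isalpha() or ch.isdigit() or ch in '-_':
--             out.append(ch)
--         elif ch == '.' and (not out or out[-1] != '.'):
--             out.append(ch)
--     s = ''.join(out)
--     # step 4
--     if s.startswith('.'):
--         s = s[1:]
--     s = s.rstrip('.')
--     # step 5
--     if not s:
--         s = 'a'
--     # step 6
--     elif len(s) > 15:
--         s = s[:15]
--         if s[-1] == '.':
--             s = s[:14]
--     # step 7 closed form
--     if len(s) < 3:
--         s = s + s[-1] * (3 - len(s))
--     return s
-- ===== Notes on version B (the rewrite author's own statement) =====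
-- stated objective: faster
-- what changed: A deletes disallowed characters by collecting them and running one str.replace pass per occurrence, then collapses repeated dots by whole-string replace passes until none remain; B fuses the filtering and the dot-collapsing into a single forward pass that tracks the last emitted character, and replaces the trailing padding while-loop by a closed-form pad, leaving the middle stages as plain string steps.
import Mathlib
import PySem

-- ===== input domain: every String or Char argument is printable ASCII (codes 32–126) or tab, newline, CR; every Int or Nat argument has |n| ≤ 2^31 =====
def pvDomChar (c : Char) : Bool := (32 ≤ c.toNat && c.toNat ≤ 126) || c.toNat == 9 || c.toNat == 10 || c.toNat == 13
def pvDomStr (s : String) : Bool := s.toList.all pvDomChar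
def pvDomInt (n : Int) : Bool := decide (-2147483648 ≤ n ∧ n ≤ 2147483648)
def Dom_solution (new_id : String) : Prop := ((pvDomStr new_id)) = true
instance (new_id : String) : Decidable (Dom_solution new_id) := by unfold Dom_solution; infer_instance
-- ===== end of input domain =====

-- B fuses A's delete-then-collapse stages (steps 1-3) into one forward pass and closes the
-- padding loop into a formula; objective: simpler one-pass decomposition of the same normalization.


-- ===== PORT A =====
-- step 3's while-loop, fuel-bounded only to make it total (each replace shortens the string,
-- so fuel = length is enough)
def solStep3A : Nat → List Char → List Char
  | 0, s => s
  | fuel + 1, s =>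
    if PySem.Chars.isIn ['.', '.'] s then
      solStep3A fuel (PySem.Chars.replace s ['.', '.'] ['.'])
    else s

-- step 7's while-loop, fuel-bounded only to make it total (the string is nonempty there,
-- so at most 2 iterations run and fuel = 3 is enough)
def solStep7A : Nat → List Char → List Char
  | 0, s => s
  | fuel + 1, s =>
    if s.length ≤ 2 then solStep7A fuel (s ++ [PySem.List.pyGetD s (-1) 'a']) else s

def solution (new_id : String) : String :=
  -- step 1
  let s0 := PySem.Chars.lower new_id.toList
  -- step 2: collect the characters to delete, then delete each with replace
  let possible : List Char := ['-', '_', '.']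
  let check := (PySem.List.pyRange 0 (PySem.List.len s0) 1).foldl (fun acc i =>
    let c := PySem.List.pyGetD s0 i ' '
    if ¬ (c ∈ possible) then
      (if PySem.Chars.isalpha c || PySem.Chars.isdigit c then acc else acc ++ [c])
    else acc) ([] : List Char)
  let s1 := check.foldl (fun s c => PySem.Chars.replace s [c] []) s0
  -- step 3
  let s2 := solStep3A s1.length s1
  -- step 4 (Python's new_id[0] raises IndexError on the empty string: Pre_solution excludes that)
  let s3 := if PySem.List.pyGet? s2 0 = some '.' then PySem.Chars.slice s2 (some 1) none else s2
  -- rstrip('.') ported by hand (PySem has no chars-argument rstrip): drop trailing '.' — exact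
  let s4 := if 1 ≤ s3.length then
      (if PySem.List.pyGet? s3 (-1) = some '.' then (s3.reverse.dropWhile (· == '.')).reverse else s3)
    else s3
  -- step 5
  let s5 := if s4 = [] then ['a'] else s4
  -- step 6
  let s6 := if 16 ≤ s5.length then
      (let t := PySem.Chars.slice s5 (some 0) (some 15)
       if PySem.List.pyGet? t (-1) = some '.' then PySem.Chars.slice t (some 0) (some 14) else t)
    else s5
  -- step 7
  String.ofList (solStep7A 3 s6)

-- ===== PORT B =====
def solution_alt (new_id : String) : String :=
  -- one forward pass fusing steps 1-3: keep letters/digits/-/_/., collapsing runs of dots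
  let out := (PySem.Chars.lower new_id.toList).foldl (fun acc c =>
    if PySem.Chars.isalpha c || PySem.Chars.isdigit c || c = '-' || c = '_' then acc ++ [c]
    else if c = '.' ∧ (acc = [] ∨ PySem.List.pyGet? acc (-1) ≠ some '.') then acc ++ [c]
    else acc) ([] : List Char)
  -- step 4; s.rstrip('.') ported by hand (PySem has no chars-argument rstrip) — exact
  let s1 := if PySem.Chars.startswith out ['.'] then PySem.Chars.slice out (some 1) none else out
  let s2 := (s1.reverse.dropWhile (· == '.')).reverse
  -- steps 5 and 6
  let s3 := if s2 = [] then ['a']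
    else if 15 < s2.length then
      (let t := PySem.Chars.slice s2 none (some 15)
       if PySem.List.pyGet? t (-1) = some '.' then PySem.Chars.slice t none (some 14) else t)
    else s2
  -- step 7, closed form
  let s4 := if s3.length < 3 then s3 ++ List.replicate (3 - s3.length) (PySem.List.pyGetD s3 (-1) 'a') else s3
  String.ofList s4

-- ===== PRECONDITION & SPEC =====
-- the character class steps 1-3 keep
def keepC (c : Char) : Bool :=
  PySem.Chars.isalpha c || PySem.Chars.isdigit c || c = '-' || c = '_' || c = '.'

-- Pre_ excludes exactly the strings whose lowercasing contains no letter, digit, hyphen,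
-- underscore or dot at all: there A's step 4 evaluates new_id[0] on the empty string and
-- raises IndexError.
def Pre_solution (new_id : String) : Prop :=
  (PySem.Chars.lower new_id.toList).any keepC = true
instance (new_id : String) : Decidable (Pre_solution new_id) := by unfold Pre_solution; infer_instance

def pvWitness_solution : String := "abc"

def Spec_solution (new_id : String) (out : String) : Prop := out = solution_alt new_id
instance (new_id : String) (out : String) : Decidable (Spec_solution new_id out) := by unfold Spec_solution; infer_instance

-- ===== CLAIM (what is proved, stated in full; the proofs are below) =====
def Claim_equal_solution : Prop := ∀ (new_id : String), Dom_solution new_id → Pre_solution new_id → Spec_solution new_id (solution new_id)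

-- ===== LEMMAS AND PROOFS =====

-- dot-squeezing: drop every '.' that directly follows an emitted '.' (flag = previous char was '.')
def sqD (b : Bool) : List Char → List Char
  | [] => []
  | c :: t => if c = '.' then (if b then sqD true t else '.' :: sqD true t) else c :: sqD false t

theorem sqD_cons (b : Bool) (c : Char) (t : List Char) :
    sqD b (c :: t) = if c = '.' then (if b then sqD true t else '.' :: sqD true t) else c :: sqD false t := rfl

-- one left-to-right non-overlapping pass of  s.replace('..', '.')
def repDD : List Char → List Char
  | [] => []
  | [c] => [c]
  | a :: b :: t => if a = '.' ∧ b = '.' then '.' :: repDD t else a :: repDD (b :: t)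

def hasDD : List Char → Bool
  | a :: b :: t => (a = '.' && b = '.') || hasDD (b :: t)
  | _ => false

-- B's fused loop, as forward recursion on the remaining input (flag = last emitted char was '.')
def fuse (b : Bool) : List Char → List Char
  | [] => []
  | c :: t =>
    if PySem.Chars.isalpha c || PySem.Chars.isdigit c || c = '-' || c = '_' then c :: fuse false t
    else if c = '.' then (if b then fuse true t else '.' :: fuse true t) else fuse b t

theorem fuse_cons (b : Bool) (c : Char) (t : List Char) :
    fuse b (c :: t) =
      if PySem.Chars.isalpha c || PySem.Chars.isdigit c || c = '-' || c = '_' then c :: fuse false t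
      else if c = '.' then (if b then fuse true t else '.' :: fuse true t) else fuse b t := rfl

theorem replace_go_single (c : Char) : ∀ (fuel : Nat) (l acc : List Char), l.length ≤ fuel →
    PySem.Chars.replace.go [c] [] fuel l acc = acc.reverse ++ l.filter (fun x => x != c) := by
  intro fuel
  induction fuel with
  | zero =>
    intro l acc h
    have : l = [] := List.eq_nil_of_length_eq_zero (Nat.le_zero.mp h)
    subst this
    simp [PySem.Chars.replace.go]
  | succ n ih =>
    intro l acc h
    cases l with
    | nil => simp [PySem.Chars.replace.go]
    | cons x t =>
      by_cases hx : x = c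
      · subst hx
        have hpre : [x].isPrefixOf (x :: t) = true := by simp [List.isPrefixOf]
        simp only [PySem.Chars.replace.go, hpre, if_pos]
        rw [show List.drop [x].length (x :: t) = t by simp]
        rw [show [].reverse ++ acc = acc from by simp]
        rw [ih t acc (by simpa using Nat.succ_le_succ_iff.mp h)]
        simp
      · have hpre : [c].isPrefixOf (x :: t) = false := by
          simp [List.isPrefixOf]
          exact fun hh => (hx hh.symm).elim
        simp only [PySem.Chars.replace.go, hpre]
        rw [ih t (x :: acc) (by simpa using Nat.succ_le_succ_iff.mp h)]
        have hne : (x != c) = true := by simp [hx]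
        simp [hne]

theorem replace_single (c : Char) (s : List Char) :
    PySem.Chars.replace s [c] [] = s.filter (fun x => x != c) := by
  unfold PySem.Chars.replace
  rw [if_neg (by simp)]
  simpa using replace_go_single c s.length s [] le_rfl

theorem foldl_filter_ne : ∀ (l t : List Char),
    l.foldl (fun s c => s.filter (fun x => x != c)) t = t.filter (fun x => !(l.contains x)) := by
  intro l
  induction l with
  | nil => intro t; simp
  | cons c l ih =>
    intro t
    simp only [List.foldl_cons, ih, List.filter_filter]
    apply List.filter_congr
    intro x _
    by_cases hx : x = c <;> simp [hx]

theorem replace_go_dd : ∀ (fuel : Nat) (l acc : List Char), l.length ≤ fuel →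
    PySem.Chars.replace.go ['.', '.'] ['.'] fuel l acc = acc.reverse ++ repDD l := by
  intro fuel
  induction fuel with
  | zero =>
    intro l acc h
    have : l = [] := List.eq_nil_of_length_eq_zero (Nat.le_zero.mp h)
    subst this
    simp [PySem.Chars.replace.go, repDD]
  | succ n ih =>
    intro l acc h
    match l with
    | [] => simp [PySem.Chars.replace.go, repDD]
    | [x] =>
      have hpre : ['.', '.'].isPrefixOf [x] = false := by simp [List.isPrefixOf]
      simp only [PySem.Chars.replace.go, hpre]
      rw [if_neg (by simp)]
      cases n <;> simp [PySem.Chars.replace.go, repDD]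
    | x :: y :: t =>
      by_cases hx : x = '.' ∧ y = '.'
      · obtain ⟨hx1, hx2⟩ := hx
        subst hx1; subst hx2
        have hpre : ['.', '.'].isPrefixOf ('.' :: '.' :: t) = true := by simp [List.isPrefixOf]
        simp only [PySem.Chars.replace.go, hpre, if_pos]
        rw [show List.drop ['.', '.'].length ('.' :: '.' :: t) = t by simp]
        rw [ih t (['.'].reverse ++ acc) (by simp at h; omega)]
        simp [repDD]
      · have hpre : ['.', '.'].isPrefixOf (x :: y :: t) = false := by
          simp [List.isPrefixOf]
          intro h1 h2
          exact (hx ⟨h1.symm, h2.symm⟩).elim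
        simp only [PySem.Chars.replace.go, hpre]
        rw [ih (y :: t) (x :: acc) (by simp at h ⊢; omega)]
        simp [repDD, hx]

theorem replace_dd (s : List Char) : PySem.Chars.replace s ['.', '.'] ['.'] = repDD s := by
  unfold PySem.Chars.replace
  rw [if_neg (by simp)]
  simpa using replace_go_dd s.length s [] le_rfl

theorem sq_repDD : ∀ (l : List Char) (b : Bool), sqD b (repDD l) = sqD b l := by
  intro l
  fun_induction repDD l with
  | case1 => intro b; rfl
  | case2 c => intro b; rfl
  | case3 a y t hd ih =>
    obtain ⟨h1, h2⟩ := hd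
    subst h1; subst h2
    intro b
    cases b <;> simp [sqD, ih]
  | case4 a y t hd ih =>
    intro b
    by_cases ha : a = '.'
    · subst ha
      have hy : ¬ y = '.' := fun hy => hd ⟨rfl, hy⟩
      cases b <;> simp [sqD, ih]
    · simp [sqD, ha, ih]

theorem sq_id : ∀ (l : List Char), hasDD l = false →
    sqD false l = l ∧ (l.head? ≠ some '.' → sqD true l = l) := by
  intro l
  induction l with
  | nil => intro h; exact ⟨rfl, fun _ => rfl⟩
  | cons c t ih =>
    intro h
    cases t with
    | nil =>
      constructor
      · by_cases hc : c = '.' <;> simp [sqD, hc]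
      · intro hc
        simp at hc
        simp [sqD, hc]
    | cons d u =>
      have hdd : ¬ (c = '.' ∧ d = '.') := by
        simp [hasDD] at h
        intro ⟨h1, h2⟩; exact absurd h2 (h.1 h1)
      have hrest : hasDD (d :: u) = false := by
        simp [hasDD] at h ⊢
        exact h.2
      have iht := ih hrest
      constructor
      · by_cases hc : c = '.'
        · subst hc
          have hd : ¬ d = '.' := fun h2 => hdd ⟨rfl, h2⟩
          rw [sqD_cons, if_pos rfl, if_neg (by decide), iht.2 (by simp [hd])]
        · rw [sqD_cons, if_neg hc, iht.1]
      · intro hc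
        simp at hc
        rw [sqD_cons, if_neg hc, iht.1]

theorem isIn_dd (l : List Char) : PySem.Chars.isIn ['.', '.'] l = hasDD l := by
  have key : ∀ (l : List Char), (['.', '.'] <:+: l) ↔ hasDD l = true := by
    intro l
    induction l with
    | nil => simp [hasDD]
    | cons c t ih =>
      rw [List.infix_cons_iff]
      cases t with
      | nil =>
        simp only [hasDD]
        constructor
        · rintro (hp | hi)
          · have := hp.length_le
            simp at this
          · have := hi.length_le
            simp at this
        · simp
      | cons d u =>
        constructor
        · rintro (hp | hi)
          · rw [List.cons_prefix_cons] at hp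
            obtain ⟨h1, hp2⟩ := hp
            rw [List.cons_prefix_cons] at hp2
            simp [hasDD, ← h1, ← hp2.1]
          · simp [hasDD, ih.mp hi]
        · intro h
          simp only [hasDD, Bool.or_eq_true, Bool.and_eq_true, decide_eq_true_eq] at h
          rcases h with ⟨h1, h2⟩ | h
          · refine Or.inl ?_
            rw [List.cons_prefix_cons]
            exact ⟨h1.symm, by rw [List.cons_prefix_cons]; exact ⟨h2.symm, by simp⟩⟩
          · exact Or.inr (ih.mpr h)
  cases h : hasDD l with
  | true => simp [PySem.Chars.isIn_iff_infix, key, h]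
  | false =>
    rw [PySem.Chars.isIn_eq_false_iff, key, h]
    simp

theorem repDD_len_le : ∀ (l : List Char), (repDD l).length ≤ l.length := by
  intro l
  fun_induction repDD l with
  | case1 => simp
  | case2 c => simp
  | case3 a y t hd ih => simp; omega
  | case4 a y t hd ih => simp at ih ⊢; omega

theorem repDD_len_lt : ∀ (l : List Char), hasDD l = true → (repDD l).length < l.length := by
  intro l
  fun_induction repDD l with
  | case1 => simp [hasDD]
  | case2 c => simp [hasDD]
  | case3 a y t hd ih =>
    intro _
    have := repDD_len_le t
    simp; omega
  | case4 a y t hd ih =>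
    intro h
    have h2 : hasDD (y :: t) = true := by
      simp [hasDD] at h ⊢
      rcases h with ⟨h1, h2⟩ | h
      · exact absurd ⟨h1, h2⟩ hd
      · exact h
    have := ih h2
    simp at this ⊢; omega

theorem step3A_eq : ∀ (fuel : Nat) (s : List Char), s.length ≤ fuel →
    solStep3A fuel s = sqD false s := by
  intro fuel
  induction fuel with
  | zero =>
    intro s h
    have : s = [] := List.eq_nil_of_length_eq_zero (Nat.le_zero.mp h)
    subst this
    rfl
  | succ n ih =>
    intro s h
    simp only [solStep3A, isIn_dd]
    cases hdd : hasDD s with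
    | false =>
      rw [if_neg (by simp [hdd])]
      exact ((sq_id s hdd).1).symm
    | true =>
      rw [if_pos rfl, replace_dd]
      rw [ih (repDD s) (by have := repDD_len_lt s hdd; omega)]
      exact sq_repDD s false

theorem fuse_filter : ∀ (l : List Char) (b : Bool), fuse b l = sqD b (l.filter keepC) := by
  intro l
  induction l with
  | nil => intro b; rfl
  | cons c t ih =>
    intro b
    by_cases h1 : (PySem.Chars.isalpha c || PySem.Chars.isdigit c || c = '-' || c = '_') = true
    · have hc : c ≠ '.' := by rintro rfl; revert h1; decide
      have hk : keepC c = true := by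
        simp only [keepC, Bool.or_eq_true] at h1 ⊢
        tauto
      rw [fuse_cons, if_pos h1]
      simp only [List.filter_cons, hk, if_pos]
      rw [sqD_cons, if_neg hc, ih]
    · by_cases h2 : c = '.'
      · subst h2
        rw [fuse_cons, if_neg h1, if_pos rfl]
        have hk : keepC '.' = true := by decide
        simp only [List.filter_cons, hk, if_pos]
        cases b <;> rw [sqD_cons, if_pos rfl] <;> simp [ih]
      · have hk : keepC c = false := by
          simp only [Bool.not_eq_true, Bool.or_eq_false_iff] at h1
          simp only [keepC, Bool.or_eq_false_iff]
          refine ⟨⟨⟨⟨h1.1.1.1, h1.1.1.2⟩, h1.1.2⟩, h1.2⟩, by simp [h2]⟩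
        rw [fuse_cons, if_neg h1, if_neg h2]
        simp only [List.filter_cons, hk]
        simp only [Bool.false_eq_true, if_false]
        exact ih b

theorem step7A_closed (s : List Char) (h : s ≠ []) :
    solStep7A 3 s = if s.length < 3 then s ++ List.replicate (3 - s.length) (PySem.List.pyGetD s (-1) 'a') else s := by
  match s with
  | [a] => simp [solStep7A, PySem.List.pyGetD_neg_one, List.replicate]
  | [a, b] => simp [solStep7A, PySem.List.pyGetD_neg_one, List.replicate]
  | a :: b :: c :: t =>
    have h1 : ¬ ((a :: b :: c :: t).length ≤ 2) := by simp
    have h2 : ¬ ((a :: b :: c :: t).length < 3) := by simp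
    simp only [solStep7A, if_neg h1, if_neg h2]

theorem foldB : ∀ (l acc : List Char),
    l.foldl (fun acc c =>
      if PySem.Chars.isalpha c || PySem.Chars.isdigit c || c = '-' || c = '_' then acc ++ [c]
      else if c = '.' ∧ (acc = [] ∨ PySem.List.pyGet? acc (-1) ≠ some '.') then acc ++ [c]
      else acc) acc = acc ++ fuse (decide (acc.getLast? = some '.')) l := by
  intro l
  induction l with
  | nil => intro acc; simp [fuse]
  | cons c t ih =>
    intro acc
    simp only [List.foldl_cons]
    by_cases h1 : (PySem.Chars.isalpha c || PySem.Chars.isdigit c || c = '-' || c = '_') = true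
    · have hc : c ≠ '.' := by rintro rfl; revert h1; decide
      rw [if_pos h1, ih (acc ++ [c]), fuse_cons, if_pos h1]
      simp [List.getLast?_concat, hc]
    · rw [if_neg h1]
      by_cases h2 : c = '.'
      · subst h2
        by_cases hb : acc.getLast? = some '.'
        · have hne : acc ≠ [] := by rintro rfl; simp at hb
          rw [if_neg (by
            simp only [PySem.List.pyGet?_neg_one]
            rintro ⟨-, h⟩
            rcases h with h | h
            · exact hne h
            · exact h hb)]
          rw [ih acc, fuse_cons, if_neg h1, if_pos rfl]
          simp [hb]
        · rw [if_pos ⟨rfl, Or.inr (by rw [PySem.List.pyGet?_neg_one]; exact hb)⟩]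
          rw [ih (acc ++ ['.']), fuse_cons, if_neg h1, if_pos rfl]
          simp [List.getLast?_concat, hb]
      · rw [if_neg (by rintro ⟨h, -⟩; exact h2 h)]
        rw [ih acc, fuse_cons, if_neg h1, if_neg h2]

theorem rstrip_id (s : List Char) (h : s.getLast? ≠ some '.') :
    (s.reverse.dropWhile (· == '.')).reverse = s := by
  rw [← List.head?_reverse] at h
  cases hr : s.reverse with
  | nil => simpa using congrArg List.reverse hr
  | cons c u =>
    rw [hr] at h
    simp only [List.head?_cons, ne_eq, Option.some.injEq] at h
    rw [List.dropWhile_cons_of_neg (by simpa using h)]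
    rw [← hr, List.reverse_reverse]

theorem startswith_dot (E : List Char) :
    PySem.Chars.startswith E ['.'] = true ↔ PySem.List.pyGet? E 0 = some '.' := by
  rw [PySem.Chars.startswith_iff]
  cases E with
  | nil => simp [PySem.List.pyGet?_zero]
  | cons c t =>
    rw [PySem.List.pyGet?_zero_cons]
    constructor
    · intro h
      rw [List.cons_prefix_cons] at h
      simp [← h.1]
    · intro h
      simp only [Option.some.injEq] at h
      rw [List.cons_prefix_cons]
      exact ⟨h.symm, List.nil_prefix⟩

-- A's and B's stages 4-6, as functions of the collapsed string
def tailA (s2 : List Char) : List Char :=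
  let s3 := if PySem.List.pyGet? s2 0 = some '.' then PySem.Chars.slice s2 (some 1) none else s2
  let s4 := if 1 ≤ s3.length then
      (if PySem.List.pyGet? s3 (-1) = some '.' then (s3.reverse.dropWhile (· == '.')).reverse else s3)
    else s3
  let s5 := if s4 = [] then ['a'] else s4
  if 16 ≤ s5.length then
    (let t := PySem.Chars.slice s5 (some 0) (some 15)
     if PySem.List.pyGet? t (-1) = some '.' then PySem.Chars.slice t (some 0) (some 14) else t)
  else s5

def tailB (out : List Char) : List Char :=
  let s1 := if PySem.Chars.startswith out ['.'] then PySem.Chars.slice out (some 1) none else out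
  let s2 := (s1.reverse.dropWhile (· == '.')).reverse
  if s2 = [] then ['a']
  else if 15 < s2.length then
    (let t := PySem.Chars.slice s2 none (some 15)
     if PySem.List.pyGet? t (-1) = some '.' then PySem.Chars.slice t none (some 14) else t)
  else s2

theorem solutionA_eq (new_id : String) :
    solution new_id = String.ofList (solStep7A 3
      (tailA (sqD false ((PySem.Chars.lower new_id.toList).filter keepC)))) := by
  simp only [solution]
  rw [PySem.List.foldl_pyRange_pyGetD (PySem.Chars.lower new_id.toList) ' '
      (fun acc c => if ¬ (c ∈ (['-', '_', '.'] : List Char)) then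
        (if PySem.Chars.isalpha c || PySem.Chars.isdigit c then acc else acc ++ [c]) else acc)
      [] (le_refl 0)]
  rw [show ((0 : Int).toNat) = 0 from rfl, List.drop_zero]
  rw [show (fun (acc : List Char) (c : Char) => if ¬ (c ∈ (['-', '_', '.'] : List Char)) then
        (if PySem.Chars.isalpha c || PySem.Chars.isdigit c then acc else acc ++ [c]) else acc)
      = (fun (acc : List Char) (c : Char) => if (!keepC c) = true then acc ++ [c] else acc) from by
    funext acc c
    by_cases h1 : c ∈ (['-', '_', '.'] : List Char)
    · rw [if_neg (by simp [h1])]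
      rw [if_neg (by
        have hk : keepC c = true := by fin_cases h1 <;> decide
        simp [hk])]
    · rw [if_pos h1]
      by_cases h2 : (PySem.Chars.isalpha c || PySem.Chars.isdigit c) = true
      · rw [if_pos h2, if_neg (by simp [keepC] at h2 ⊢; rcases h2 with h | h <;> simp [h])]
      · rw [if_neg h2]
        rw [if_pos (by
          simp only [Bool.not_eq_true] at h2
          simp only [keepC, Bool.not_eq_eq_eq_not, Bool.not_true, Bool.or_eq_false_iff]
          simp only [Bool.or_eq_false_iff] at h2
          simp only [List.mem_cons, List.mem_singleton, not_or] at h1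
          refine ⟨⟨⟨⟨h2.1, h2.2⟩, by simp [h1.1]⟩, by simp [h1.2.1]⟩, by simp [h1.2.2]⟩)]]
  rw [PySem.List.foldl_append_if_eq_filter]
  rw [List.nil_append]
  rw [show (fun (s : List Char) (c : Char) => PySem.Chars.replace s [c] [])
      = (fun (s : List Char) (c : Char) => s.filter (fun x => x != c)) from by
    funext s c
    exact replace_single c s]
  rw [foldl_filter_ne]
  rw [show (PySem.Chars.lower new_id.toList).filter
        (fun x => !(((PySem.Chars.lower new_id.toList).filter (fun c => !keepC c)).contains x))
      = (PySem.Chars.lower new_id.toList).filter keepC from by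
    apply List.filter_congr
    intro x hx
    cases hk : keepC x
    · simp [List.contains_iff_mem, List.mem_filter, hx, hk]
    · simp [List.contains_iff_mem, List.mem_filter, hk]]
  rw [step3A_eq _ _ le_rfl]
  rfl

theorem solutionB_eq (new_id : String) :
    solution_alt new_id = String.ofList
      (let s3 := tailB (sqD false ((PySem.Chars.lower new_id.toList).filter keepC))
       if s3.length < 3 then s3 ++ List.replicate (3 - s3.length) (PySem.List.pyGetD s3 (-1) 'a') else s3) := by
  simp only [solution_alt]
  rw [foldB]
  rw [show (decide (([] : List Char).getLast? = some '.')) = false from by decide]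
  rw [List.nil_append, fuse_filter]
  rfl

theorem tailB_ne_nil (E : List Char) : tailB E ≠ [] := by
  simp only [tailB]
  by_cases h2 : (((if PySem.Chars.startswith E ['.'] then PySem.Chars.slice E (some 1) none else E).reverse.dropWhile (· == '.')).reverse) = []
  · rw [if_pos h2]
    simp
  · rw [if_neg h2]
    by_cases h6 : 15 < (((if PySem.Chars.startswith E ['.'] then PySem.Chars.slice E (some 1) none else E).reverse.dropWhile (· == '.')).reverse).length
    · rw [if_pos h6]
      set s2 := (((if PySem.Chars.startswith E ['.'] then PySem.Chars.slice E (some 1) none else E).reverse.dropWhile (· == '.')).reverse) with hs2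
      have ht : (PySem.Chars.slice s2 none (some 15)) = s2.take 15 := by
        rw [PySem.Chars.slice_eq_listSlice, PySem.List.slice_to (xs := s2) (b := 15) (by norm_num)]
        simp
      rw [ht]
      by_cases hd : PySem.List.pyGet? (s2.take 15) (-1) = some '.'
      · rw [if_pos hd]
        have : (PySem.Chars.slice (s2.take 15) none (some 14)) = (s2.take 15).take 14 := by
          rw [PySem.Chars.slice_eq_listSlice, PySem.List.slice_to (xs := s2.take 15) (b := 14) (by norm_num)]
          simp
        rw [this]
        apply List.ne_nil_of_length_pos
        rw [List.length_take, List.length_take]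
        omega
      · rw [if_neg hd]
        apply List.ne_nil_of_length_pos
        rw [List.length_take]
        omega
    · rw [if_neg h6]
      exact h2

theorem tailAB (E : List Char) : tailA E = tailB E := by
  simp only [tailA, tailB]
  have hstart : (if PySem.Chars.startswith E ['.'] then PySem.Chars.slice E (some 1) none else E)
      = (if PySem.List.pyGet? E 0 = some '.' then PySem.Chars.slice E (some 1) none else E) := by
    by_cases h0 : PySem.List.pyGet? E 0 = some '.'
    · rw [if_pos h0, if_pos ((startswith_dot E).mpr h0)]
    · rw [if_neg h0, if_neg (by
        intro hs
        exact h0 ((startswith_dot E).mp hs))]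
  rw [hstart]
  set s3 := (if PySem.List.pyGet? E 0 = some '.' then PySem.Chars.slice E (some 1) none else E) with hs3
  have h45 : (if 1 ≤ s3.length then
      (if PySem.List.pyGet? s3 (-1) = some '.' then (s3.reverse.dropWhile (· == '.')).reverse else s3)
    else s3) = (s3.reverse.dropWhile (· == '.')).reverse := by
    rcases hc : s3 with _ | ⟨c, t⟩
    · simp
    · rw [if_pos (by simp)]
      by_cases hl : PySem.List.pyGet? (c :: t) (-1) = some '.'
      · rw [if_pos hl]
      · rw [if_neg hl, rstrip_id _ (by rwa [PySem.List.pyGet?_neg_one] at hl)]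
  rw [h45]
  set s4 := (s3.reverse.dropWhile (· == '.')).reverse with hs4
  by_cases h4 : s4 = []
  · rw [if_pos h4, if_pos h4]
    rw [if_neg (by simp)]
  · rw [if_neg h4, if_neg h4]
    by_cases h6 : 16 ≤ s4.length
    · rw [if_pos h6]
      rw [if_pos (show 15 < s4.length by omega)]
      simp only [PySem.Chars.slice_eq_listSlice, PySem.List.slice_zero_start]
    · rw [if_neg h6]
      rw [if_neg (show ¬ 15 < s4.length by omega)]

-- ===== VERDICT (by name: the statement is the Claim_ definition above) =====
theorem solution_spec : Claim_equal_solution := by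
  intro new_id _ _
  unfold Spec_solution
  rw [solutionA_eq, solutionB_eq]
  simp only [tailAB]
  rw [step7A_closed _ (tailB_ne_nil _)]
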